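-- pv_equiv track=rewrite | github.com/lwwch/asymmetric-numeral-systems | minimal.py | generate_frequency_table
-- ===== SOURCE A (Python) =====
-- MODEL_BITS = 12
--
-- def generate_frequency_table(raw):
--     enc_total = 1 << MODEL_BITS
--     freqs = [0] * 256  # There are 256 discrete values of a byte
--     for b in raw:
--         freqs[b] += 1
--     total = sum(freqs)
--
--     # TODO: better explanation
--     # Sidestep the scaled freq less than 2 issue. Alternatively, see Ryg's solution:
--     # https://github.com/rygorous/ryg_rans/blob/master/rans_byte.h#L199-L229
--     # It feels like this is an iterative solution to the stealing method he implements,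
--     # but I haven't been through both in enough detail yet.
--     while True:
--         added = 0
--         limit = (total // enc_total) + 1
--         for i, f in enumerate(freqs):
--             if f != 0 and f < limit:
--                 added += limit - f
--                 freqs[i] = limit
--
--         if added == 0:
--             break
--
--         total += added
--
--     freqs = [f * enc_total // total for f in freqs]
--     return freqs
-- ===== SOURCE B (Python) =====
-- MODEL_BITS = 12
--
-- def generate_frequency_table(raw):
--     enc_total = 1 << MODEL_BITS
--     freqs = [0] * 256
--     for b in raw:
--         freqs[b] += 1
--
--     # Closed-form computation of the loop's terminal limit L:
--     # L is the least value with g(L) <= L, where g(L) = (sum of max(f, L)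
--     # over nonzero f) // enc_total + 1.  Scan the sorted nonzero counts once,
--     # solving the threshold inequality per count-class.
--     nz = sorted(f for f in freqs if f != 0)
--     m = len(nz)
--     S = sum(nz)
--     L = None
--     for c in range(m + 1):
--         low = S // (enc_total - c) + 1
--         if c > 0 and nz[c - 1] + 1 > low:
--             low = nz[c - 1] + 1
--         if c == m or nz[c] >= low:
--             L = low
--             break
--         S -= nz[c]
--
--     table = [f if f == 0 else max(f, L) for f in freqs]
--     total = sum(table)
--     return [f * enc_total // total for f in table]
-- ===== Notes on version B (the rewrite author's own statement) =====
-- stated objective: alternative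
-- what changed: The repeated whole-table 'raise to limit and rescan' fixpoint while-loop is replaced by a single pass over the sorted nonzero counts that solves the loop's terminal limit L in closed form per count-class (least L with (sum of max(f,L))//4096 + 1 <= L), then builds the table once; counting and the final scaling are unchanged.
import Mathlib
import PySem

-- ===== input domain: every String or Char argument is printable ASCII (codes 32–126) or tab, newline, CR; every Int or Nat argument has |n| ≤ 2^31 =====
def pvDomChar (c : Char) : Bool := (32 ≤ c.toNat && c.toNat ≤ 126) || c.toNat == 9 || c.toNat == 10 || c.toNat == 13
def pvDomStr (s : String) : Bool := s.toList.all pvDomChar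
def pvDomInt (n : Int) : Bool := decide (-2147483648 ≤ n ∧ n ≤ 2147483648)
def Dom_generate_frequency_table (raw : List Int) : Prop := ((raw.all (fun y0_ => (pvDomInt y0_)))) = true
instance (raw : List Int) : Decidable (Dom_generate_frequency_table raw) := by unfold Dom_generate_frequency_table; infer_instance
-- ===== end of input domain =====

-- B replaces A's repeated whole-table "raise to limit" fixpoint loop by a single
-- sorted scan of the nonzero counts that solves for the loop's terminal limit
-- directly (objective: alternative algorithm, same counting and final scaling).

-- ===== PORT A =====
-- freqs[b] += 1  (Python indexing: negative b counts from the end)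
def pvBumpA (freqs : List Int) (b : Int) : List Int :=
  PySem.List.pySetD freqs b (PySem.List.pyGetD freqs b 0 + 1)

-- one pass of the inner for-loop: raises entries below limit, accumulates added
def pvPassA (limit : Int) : List Int → List Int × Int
  | [] => ([], 0)
  | f :: rest =>
    let r := pvPassA limit rest
    if f ≠ 0 ∧ f < limit then (limit :: r.1, r.2 + (limit - f)) else (f :: r.1, r.2)

-- the 'while True' loop; fuel raw.length + 2 covers it: the limit strictly
-- increases every continuing iteration and its terminal value is ≤ len(raw)+1
def pvLoopA (fuel : Nat) (freqs : List Int) (total : Int) : List Int × Int :=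
  match fuel with
  | 0 => (freqs, total)
  | Nat.succ fuel =>
    let limit := PySem.Int.floordiv total 4096 + 1
    let p := pvPassA limit freqs
    if p.2 = 0 then (p.1, total) else pvLoopA fuel p.1 (total + p.2)

def generate_frequency_table (raw : List Int) : List Int :=
  let freqs := raw.foldl pvBumpA (List.replicate 256 0)
  let total := freqs.sum
  let r := pvLoopA (raw.length + 2) freqs total
  r.1.map (fun f => PySem.Int.floordiv (f * 4096) r.2)

-- ===== PORT B =====
def pvBumpB (freqs : List Int) (b : Int) : List Int :=
  PySem.List.pySetD freqs b (PySem.List.pyGetD freqs b 0 + 1)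

-- the scan over c = 0..m of Source B, carrying nz[c:] (rest), c, nz[c-1] (prev), S
def pvScanB (rest : List Int) (c : Nat) (prev : Option Int) (S : Int) : Int :=
  let low0 := PySem.Int.floordiv S (4096 - (c : Int)) + 1
  let low := match prev with
    | some p => if p + 1 > low0 then p + 1 else low0
    | none => low0
  match rest with
  | [] => low
  | f :: rest' => if f ≥ low then low else pvScanB rest' (c + 1) (some f) (S - f)

def generate_frequency_table_alt (raw : List Int) : List Int :=
  let freqs := raw.foldl pvBumpB (List.replicate 256 0)
  let nz := PySem.List.sorted (freqs.filter (fun f => f != 0)) (fun x => x) false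
  let L := pvScanB nz 0 none nz.sum
  let table := freqs.map (fun f => if f = 0 then f else max f L)
  let total := table.sum
  table.map (fun f => PySem.Int.floordiv (f * 4096) total)

-- ===== PRECONDITION & SPEC =====
-- Pre_ excludes exactly the inputs where the Python A raises: an empty raw
-- (ZeroDivisionError in the final scaling) and entries outside [-256, 256)
-- (IndexError on freqs[b]); B raises identically there.
def Pre_generate_frequency_table (raw : List Int) : Prop :=
  raw ≠ [] ∧ ∀ b ∈ raw, -256 ≤ b ∧ b < 256
instance (raw : List Int) : Decidable (Pre_generate_frequency_table raw) := by
  unfold Pre_generate_frequency_table; infer_instance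

def pvWitness_generate_frequency_table : List Int := [0]

def Spec_generate_frequency_table (raw : List Int) (out : List Int) : Prop := out = generate_frequency_table_alt raw
instance (raw : List Int) (out : List Int) : Decidable (Spec_generate_frequency_table raw out) := by unfold Spec_generate_frequency_table; infer_instance

-- ===== CLAIM (what is proved, stated in full; the proofs are below) =====
def Claim_equal_generate_frequency_table : Prop := ∀ (raw : List Int), Dom_generate_frequency_table raw → Pre_generate_frequency_table raw → Spec_generate_frequency_table raw (generate_frequency_table raw)

-- ===== LEMMAS AND PROOFS =====

-- abstraction shared by the two sides: the table after raising to L,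
-- the next limit g, and 'L absorbs the loop' as a predicate on naturals
def pvRaise (L : Int) (fs : List Int) : List Int :=
  fs.map (fun f => if f = 0 then f else max f L)
def pvG (fs : List Int) (L : Int) : Int :=
  PySem.Int.floordiv (pvRaise L fs).sum 4096 + 1
def pvP (fs : List Int) (n : Nat) : Prop := pvG fs (n : Int) ≤ (n : Int)
-- B-side twin over the sorted nonzero list, at an arbitrary integer L
def pvGnz (nz : List Int) (L : Int) : Int :=
  PySem.Int.floordiv ((nz.map (fun f => max f L)).sum) 4096 + 1
def pvQ (nz : List Int) (L : Int) : Prop := pvGnz nz L ≤ L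

theorem pvPassA_eq (limit : Int) (xs : List Int) :
    pvPassA limit xs = (xs.map (fun f => if f ≠ 0 ∧ f < limit then limit else f),
      (xs.map (fun f => if f ≠ 0 ∧ f < limit then limit else f)).sum - xs.sum) := by
  induction xs with
  | nil => simp [pvPassA]
  | cons f rest ih =>
    simp only [pvPassA, ih, List.map_cons, List.sum_cons]
    split_ifs with h
    · simp only [Prod.mk.injEq]; exact ⟨trivial, by ring⟩
    · simp only [Prod.mk.injEq]; exact ⟨trivial, by ring⟩

theorem pvSum_set_succ (l : List Int) (k : Nat) (hk : k < l.length) :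
    (l.set k (l[k] + 1)).sum = l.sum + 1 := by
  rw [List.sum_set]
  have hd : l.drop k = l[k] :: l.drop (k+1) := List.drop_eq_getElem_cons hk
  have : l.sum = (l.take k).sum + (l.drop k).sum := by
    conv_lhs => rw [← List.take_append_drop k l]
    rw [List.sum_append]
  rw [this, hd]
  simp only [List.sum_cons, hk, if_pos]
  ring

theorem pvBumpA_eq (acc : List Int) (b : Int) (hl : acc.length = 256)
    (h1 : -256 ≤ b) (h2 : b < 256) :
    ∃ k : Nat, ∃ hk : k < acc.length, pvBumpA acc b = acc.set k (acc[k] + 1) := by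
  by_cases hb : 0 ≤ b
  · refine ⟨b.toNat, by omega, ?_⟩
    rw [pvBumpA, PySem.List.pySetD_of_nonneg acc _ hb,
      PySem.List.pyGetD_eq_getElem acc 0 hb (by omega)]
  · refine ⟨256 - (-b).toNat, by omega, ?_⟩
    have hidx : PySem.List.pyIdx? acc.length b = some (256 - (-b).toNat) := by
      unfold PySem.List.pyIdx?
      rw [if_neg hb, if_pos (by omega)]
      rw [hl]
    unfold pvBumpA PySem.List.pySetD PySem.List.pySet? PySem.List.pyGetD PySem.List.pyGet?
    rw [hidx]
    simp only [Option.bind_some, Option.map_some, Option.getD_some]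
    rw [List.getElem?_eq_getElem (by omega)]
    rfl

theorem pvCount_spec (raw : List Int) : ∀ acc : List Int, acc.length = 256 →
    (∀ f ∈ acc, 0 ≤ f) → (∀ b ∈ raw, -256 ≤ b ∧ b < 256) →
    (raw.foldl pvBumpA acc).length = 256 ∧ (∀ f ∈ raw.foldl pvBumpA acc, 0 ≤ f) ∧
      (raw.foldl pvBumpA acc).sum = acc.sum + raw.length := by
  induction raw with
  | nil => intro acc h1 h2 h3; simpa using ⟨h1, h2⟩
  | cons b raw ih =>
    intro acc h1 h2 h3
    obtain ⟨hb1, hb2⟩ := h3 b (by simp)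
    obtain ⟨k, hk, heq⟩ := pvBumpA_eq acc b h1 hb1 hb2
    have hlen' : (pvBumpA acc b).length = 256 := by rw [heq]; simpa using h1
    have hpos' : ∀ f ∈ pvBumpA acc b, 0 ≤ f := by
      rw [heq]
      intro f hf
      rcases List.mem_or_eq_of_mem_set hf with hf' | rfl
      · exact h2 f hf'
      · have := h2 acc[k] (by exact List.getElem_mem hk)
        omega
    have hsum' : (pvBumpA acc b).sum = acc.sum + 1 := by
      rw [heq]; exact pvSum_set_succ acc k hk
    have := ih (pvBumpA acc b) hlen' hpos' (fun x hx => h3 x (by simp [hx]))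
    refine ⟨this.1, this.2.1, ?_⟩
    rw [List.foldl_cons] at *
    rw [this.2.2, hsum', List.length_cons]
    push_cast
    omega

theorem pvRaise_zero (fs : List Int) (h : ∀ f ∈ fs, 0 ≤ f) : pvRaise 0 fs = fs := by
  unfold pvRaise
  rw [List.map_congr_left (g := id), List.map_id]
  intro f hf
  by_cases h0 : f = 0 <;> simp [h0]
  exact h f hf

theorem pvRaise_sum_nonneg (fs : List Int) (h : ∀ f ∈ fs, 0 ≤ f) (L : Int) :
    0 ≤ (pvRaise L fs).sum := by
  apply List.sum_nonneg
  intro x hx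
  obtain ⟨f, hf, rfl⟩ := List.mem_map.1 hx
  by_cases h0 : f = 0 <;> simp [h0]
  exact Or.inl (h f hf)

theorem pvG_mono (fs : List Int) {L L' : Int} (h : L ≤ L') : pvG fs L ≤ pvG fs L' := by
  unfold pvG
  have hs : (pvRaise L fs).sum ≤ (pvRaise L' fs).sum := by
    unfold pvRaise
    apply List.sum_le_sum
    intro f hf
    by_cases h0 : f = 0 <;> simp [h0]
    omega
  have := (PySem.Int.le_floordiv_iff_mul_le (a := (pvRaise L' fs).sum)
      (q := PySem.Int.floordiv (pvRaise L fs).sum 4096) (by norm_num : (0:Int) < 4096)).2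
  rw [PySem.Int.floordiv_eq_ediv_of_pos (by norm_num), PySem.Int.floordiv_eq_ediv_of_pos (by norm_num)]
  have := Int.ediv_le_ediv (by norm_num : (0:Int) < 4096) hs
  omega

theorem pvG_pos (fs : List Int) (h : ∀ f ∈ fs, 0 ≤ f) (L : Int) : 1 ≤ pvG fs L := by
  unfold pvG
  have := pvRaise_sum_nonneg fs h L
  rw [PySem.Int.floordiv_eq_ediv_of_pos (by norm_num)]
  have := Int.ediv_nonneg this (by norm_num : (0:Int) ≤ 4096)
  omega

theorem pvP_threshold (fs : List Int) (h : ∀ f ∈ fs, 0 ≤ f) (hlen : fs.length = 256)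
    (n : Nat) (hn : fs.sum + 4096 ≤ 3840 * (n : Int)) : pvP fs n := by
  unfold pvP pvG
  have hb : (pvRaise (n : Int) fs).sum ≤ fs.sum + 256 * (n : Int) := by
    have : (pvRaise (n : Int) fs).sum ≤ (fs.map (fun f => f + (n : Int))).sum := by
      unfold pvRaise
      apply List.sum_le_sum
      intro f hf
      have := h f hf
      by_cases h0 : f = 0 <;> simp [h0] <;> omega
    have h2 : (fs.map (fun f => f + (n : Int))).sum = fs.sum + fs.length * (n : Int) := by
      induction fs with
      | nil => simp
      | cons a l ih => simp [ih]; push_cast; ring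
    rw [h2, hlen] at this
    push_cast at this ⊢
    omega
  rw [PySem.Int.floordiv_eq_ediv_of_pos (by norm_num)]
  have h3 : (pvRaise (n : Int) fs).sum / 4096 ≤ ((n:Int) - 1) := by
    apply Int.ediv_le_of_le_mul (by norm_num)
    nlinarith
  omega

theorem pvMap_eq_self_of_sum_eq (fn : Int → Int) (xs : List Int)
    (h : ∀ x ∈ xs, x ≤ fn x) (hs : (xs.map fn).sum = xs.sum) : ∀ x ∈ xs, fn x = x := by
  induction xs with
  | nil => simp
  | cons a l ih =>
    simp only [List.map_cons, List.sum_cons] at hs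
    have h1 : a ≤ fn a := h a (by simp)
    have h2 : l.sum ≤ (l.map fn).sum := by
      calc l.sum = (l.map id).sum := by simp
        _ ≤ (l.map fn).sum := List.sum_le_sum (fun x hx => h x (by simp [hx]))
    intro x hx
    rcases List.mem_cons.1 hx with rfl | hx'
    · omega
    · exact ih (fun y hy => h y (by simp [hy])) (by omega) x hx'

theorem pvPass_raise (fs : List Int) (h : ∀ f ∈ fs, 0 ≤ f) {L limit : Int}
    (hL : 0 ≤ L) (hlim : L < limit) :
    (pvRaise L fs).map (fun f => if f ≠ 0 ∧ f < limit then limit else f)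
      = pvRaise limit fs := by
  unfold pvRaise
  rw [List.map_map]
  apply List.map_congr_left
  intro f hf
  have hf0 := h f hf
  by_cases h0 : f = 0
  · simp [h0]
  · have hfpos : 0 < f := by omega
    simp only [Function.comp_apply, if_neg h0]
    have hmax0 : max f L ≠ 0 := by
      have : f ≤ max f L := le_max_left f L
      omega
    by_cases hc : max f L < limit
    · rw [if_pos ⟨hmax0, hc⟩]
      have : f < limit := lt_of_le_of_lt (le_max_left f L) hc
      omega
    · rw [if_neg (by tauto)]
      have : L < max f L := by omega
      have hfL : max f L = f := by omega
      rw [hfL]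
      omega

theorem pvStep_ge (limit : Int) (x : Int) : x ≤ (if x ≠ 0 ∧ x < limit then limit else x) := by
  split_ifs with h
  · exact le_of_lt h.2
  · exact le_refl x

theorem pvRaise_congr (fs : List Int) {L L' : Int}
    (h : ∀ f ∈ fs, f ≠ 0 → max f L = max f L') : pvRaise L fs = pvRaise L' fs := by
  unfold pvRaise
  apply List.map_congr_left
  intro f hf
  by_cases h0 : f = 0
  · simp [h0]
  · simp only [if_neg h0]
    exact h f hf h0

theorem pvLoopA_eq (fs : List Int) (hfs : ∀ f ∈ fs, 0 ≤ f) (Lb : Nat)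
    (hfix : pvP fs Lb) (hmin : ∀ n : Nat, n < Lb → ¬ pvP fs n) :
    ∀ (fuel : Nat) (L : Nat), L ≤ Lb → Lb - L < fuel →
      pvLoopA fuel (pvRaise (L : Int) fs) (pvRaise (L : Int) fs).sum
        = (pvRaise (Lb : Int) fs, (pvRaise (Lb : Int) fs).sum) := by
  intro fuel
  induction fuel with
  | zero => intro L _ h; omega
  | succ fuel ih =>
    intro L hLle hfuel
    set X := pvRaise (L : Int) fs with hX
    have hXpos : ∀ x ∈ X, 0 ≤ x := by
      intro x hx
      obtain ⟨f, hf, rfl⟩ := List.mem_map.1 hx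
      have := hfs f hf
      by_cases h0 : f = 0 <;> simp [h0] <;> omega
    show pvLoopA (fuel+1) X X.sum = _
    rw [pvLoopA]
    simp only [pvPassA_eq]
    set limit := PySem.Int.floordiv X.sum 4096 + 1 with hlimit
    have hlimG : limit = pvG fs (L : Int) := rfl
    by_cases hA : ((X.map (fun f => if f ≠ 0 ∧ f < limit then limit else f)).sum - X.sum) = 0
    · -- break: nothing raised
      rw [if_pos hA]
      have hpoint : ∀ x ∈ X, (if x ≠ 0 ∧ x < limit then limit else x) = x :=
        pvMap_eq_self_of_sum_eq _ X (fun x _ => pvStep_ge limit x) (by omega)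
      have hmapeq : X.map (fun f => if f ≠ 0 ∧ f < limit then limit else f) = X :=
        List.map_congr_left (fun x hx => hpoint x hx) |>.trans (List.map_id X)
      -- every nonzero original f has max f L ≥ limit, hence f ≥ limit when L < limit
      rcases Nat.lt_or_ge L Lb with hLlt | hLeq
      · -- L < Lb : stale break; show the table is already the terminal one
        have hnP : ¬ pvP fs L := hmin L hLlt
        have hgt : (L : Int) < limit := by
          rw [hlimG]; unfold pvP at hnP; omega
        have hge : ∀ f ∈ fs, f ≠ 0 → limit ≤ f := by
          intro f hf h0
          have hx : (if f = 0 then f else max f (L : Int)) ∈ X := by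
            rw [hX]; exact List.mem_map.2 ⟨f, hf, rfl⟩
          rw [if_neg h0] at hx
          have hp := hpoint _ hx
          have hfpos : 0 < f := by have := hfs f hf; omega
          have hne : max f (L : Int) ≠ 0 := by
            have := le_max_left f (L : Int); omega
          by_cases hlt : max f (L : Int) < limit
          · rw [if_pos ⟨hne, hlt⟩] at hp
            omega
          · rcases max_choice f (L : Int) with hh | hh <;> omega
        -- pvRaise limit fs = pvRaise L fs, so limit is a fixpoint ⇒ Lb ≤ limit
        have hRlim : pvRaise limit fs = pvRaise (L : Int) fs := by
          apply pvRaise_congr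
          intro f hf h0
          have h1 := hge f hf h0
          have : 0 ≤ (L : Int) := by positivity
          omega
        have hfixlim : pvG fs limit ≤ limit := by
          unfold pvG
          rw [hRlim, ← hX, ← hlimit]
        have hlim0 : 0 ≤ limit := by
          have := pvG_pos fs hfs (L : Int)
          rw [hlimG]; omega
        have hLble : (Lb : Int) ≤ limit := by
          by_contra hc
          push_neg at hc
          have hn : limit.toNat < Lb := by omega
          have := hmin limit.toNat hn
          unfold pvP at this
          rw [Int.toNat_of_nonneg hlim0] at this
          exact this hfixlim
        have : pvRaise (L : Int) fs = pvRaise (Lb : Int) fs := by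
          apply pvRaise_congr
          intro f hf h0
          have h1 := hge f hf h0
          have : 0 ≤ (L : Int) := by positivity
          have : (L:Int) ≤ (Lb:Int) := by exact_mod_cast hLle
          omega
        rw [hmapeq, hX, this]
      · -- L = Lb
        have : L = Lb := by omega
        subst this
        rw [hmapeq, hX]
    · -- continue
      rw [if_neg hA]
      have hnotfix : L < Lb := by
        rcases Nat.lt_or_ge L Lb with h | h
        · exact h
        · exfalso
          have : L = Lb := by omega
          subst this
          unfold pvP at hfix
          have hlimle : limit ≤ (L : Int) := by rw [hlimG]; exact hfix
          have hid : ∀ x ∈ X, (if x ≠ 0 ∧ x < limit then limit else x) = x := by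
            intro x hx
            obtain ⟨f, hf, rfl⟩ := List.mem_map.1 hx
            by_cases h0 : f = 0
            · simp [h0]
            · rw [if_neg h0]
              have : (L : Int) ≤ max f (L:Int) := le_max_right _ _
              have hne : max f (L:Int) ≠ 0 := by
                have := hfs f hf; have := le_max_left f (L:Int); omega
              rw [if_neg (by push_neg; intro _; omega)]
          have : X.map (fun f => if f ≠ 0 ∧ f < limit then limit else f) = X :=
            List.map_congr_left (fun x hx => hid x hx) |>.trans (List.map_id X)
          rw [this] at hA
          omega
      have hgt : (L : Int) < limit := by
        have := hmin L hnotfix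
        unfold pvP at this
        rw [hlimG]; omega
      have hL0 : (0:Int) ≤ (L:Int) := by positivity
      have hpr := pvPass_raise fs hfs hL0 hgt
      rw [← hX] at hpr
      rw [hpr] at hA ⊢
      have hsum : X.sum + ((pvRaise limit fs).sum - X.sum) = (pvRaise limit fs).sum := by ring
      rw [hsum]
      -- limit ≤ Lb
      have hlimle : limit ≤ (Lb : Int) := by
        rw [hlimG]
        have h1 : pvG fs (L : Int) ≤ pvG fs (Lb : Int) := pvG_mono fs (by exact_mod_cast hLle)
        unfold pvP at hfix
        omega
      have hlim0 : 0 < limit := by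
        have := pvG_pos fs hfs (L : Int)
        rw [hlimG]; omega
      have hcast : ((limit.toNat : Nat) : Int) = limit := Int.toNat_of_nonneg (le_of_lt hlim0)
      have := ih limit.toNat (by omega) (by omega)
      rw [hcast] at this
      exact this

theorem pvG_eq_gnz (fs nz : List Int)
    (hperm : nz.Perm (fs.filter (fun f => f != 0))) (L : Int) :
    pvG fs L = pvGnz nz L := by
  unfold pvG pvGnz
  congr 2
  have h1 : (nz.map (fun f => max f L)).sum
      = ((fs.filter (fun f => f != 0)).map (fun f => max f L)).sum :=
    (hperm.map _).sum_eq
  rw [h1]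
  clear h1 hperm
  induction fs with
  | nil => simp [pvRaise]
  | cons a l ih =>
    by_cases h0 : a = 0
    · simp [pvRaise, h0] at *
      exact ih
    · simp only [pvRaise, List.map_cons, List.sum_cons, List.filter_cons,
        bne_iff_ne, ne_eq, h0, not_false_eq_true, decide_true, if_true, if_false,
        if_neg h0] at *
      rw [ih]

theorem pvGnz_pos (nz : List Int) (h : ∀ f ∈ nz, 0 < f) (L : Int) : 1 ≤ pvGnz nz L := by
  unfold pvGnz
  have hs : 0 ≤ (nz.map (fun f => max f L)).sum := by
    apply List.sum_nonneg
    intro x hx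
    obtain ⟨f, hf, rfl⟩ := List.mem_map.1 hx
    have := h f hf
    omega
  rw [PySem.Int.floordiv_eq_ediv_of_pos (by norm_num)]
  have := Int.ediv_nonneg hs (by norm_num : (0:Int) ≤ 4096)
  omega

theorem pvRegion_sum (done rest : List Int) (L : Int)
    (hdone : ∀ f ∈ done, f < L) (hrest : ∀ f ∈ rest, L ≤ f) :
    ((done ++ rest).map (fun f => max f L)).sum = (done.length : Int) * L + rest.sum := by
  rw [List.map_append, List.sum_append]
  congr 1
  · have : done.map (fun f => max f L) = done.map (fun _ => L) :=
      List.map_congr_left (fun f hf => by have := hdone f hf; omega)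
    rw [this, List.map_const', List.sum_replicate, nsmul_eq_mul]
  · have : rest.map (fun f => max f L) = rest.map id :=
      List.map_congr_left (fun f hf => by have := hrest f hf; simp; omega)
    rw [this, List.map_id]

theorem pvQ_iff (nz done rest : List Int) (hsplit : nz = done ++ rest)
    (hc : done.length ≤ 256) (L : Int)
    (hdone : ∀ f ∈ done, f < L) (hrest : ∀ f ∈ rest, L ≤ f) :
    (pvQ nz L ↔ PySem.Int.floordiv rest.sum (4096 - (done.length : Int)) + 1 ≤ L) := by
  have hcpos : (0:Int) < 4096 - (done.length : Int) := by
    have : (done.length : Int) ≤ 256 := by exact_mod_cast hc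
    omega
  unfold pvQ pvGnz
  rw [hsplit, pvRegion_sum done rest L hdone hrest]
  have h1 : PySem.Int.floordiv ((done.length : Int) * L + rest.sum) 4096 + 1 ≤ L
      ↔ (done.length : Int) * L + rest.sum < L * 4096 := by
    constructor
    · intro h
      have := (PySem.Int.floordiv_lt_iff_lt_mul
        (a := (done.length : Int) * L + rest.sum) (q := L) (by norm_num : (0:Int) < 4096)).1
      omega
    · intro h
      have := (PySem.Int.floordiv_lt_iff_lt_mul
        (a := (done.length : Int) * L + rest.sum) (q := L) (by norm_num : (0:Int) < 4096)).2 h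
      omega
  have h2 : PySem.Int.floordiv rest.sum (4096 - (done.length : Int)) + 1 ≤ L
      ↔ rest.sum < L * (4096 - (done.length : Int)) := by
    constructor
    · intro h
      have := (PySem.Int.floordiv_lt_iff_lt_mul
        (a := rest.sum) (q := L) hcpos).1
      omega
    · intro h
      have := (PySem.Int.floordiv_lt_iff_lt_mul
        (a := rest.sum) (q := L) hcpos).2 h
      omega
  rw [h1, h2]
  have hr : L * (4096 - (done.length : Int)) = L * 4096 - (done.length : Int) * L := by ring
  constructor <;> intro h <;> linarith [hr]

theorem pvScanB_eq (nz : List Int) (hpos : ∀ f ∈ nz, 0 < f)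
    (hsort : nz.Pairwise (· ≤ ·)) (hlen : nz.length ≤ 256) (Lb : Int)
    (hfix : pvQ nz Lb) (hmin : ∀ L : Int, L < Lb → ¬ pvQ nz L) :
    ∀ (rest done : List Int) (prev : Option Int), nz = done ++ rest →
      0 ≤ prev.getD 0 → (∀ f ∈ done, f ≤ prev.getD 0) →
      (∀ L : Int, L ≤ prev.getD 0 → ¬ pvQ nz L) →
      pvScanB rest done.length prev rest.sum = Lb := by
  intro rest
  induction rest with
  | nil =>
    intro done prev hsplit hpv hdone hinv
    set pv := prev.getD 0 with hpvd
    have hc : done.length ≤ 256 := by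
      have := congrArg List.length hsplit
      simp at this
      omega
    have hcpos : (0:Int) < 4096 - (done.length : Int) := by
      have : (done.length : Int) ≤ 256 := by exact_mod_cast hc
      omega
    set low0 := PySem.Int.floordiv (0:Int) (4096 - (done.length : Int)) + 1 with hlow0
    have hlow0pos : 1 ≤ low0 := by
      rw [hlow0, PySem.Int.floordiv_eq_ediv_of_pos hcpos]
      simp
    have hrun : pvScanB [] done.length prev 0 = max (pv + 1) low0 := by
      rcases prev with _ | p
      · simp only [pvScanB, hpvd]
        simp only [Option.getD_none]
        omega
      · simp only [pvScanB, hpvd]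
        simp only [Option.getD_some]
        split_ifs <;> omega
    have hchar : ∀ L : Int, pv < L → (pvQ nz L ↔ low0 ≤ L) := by
      intro L hL
      have := pvQ_iff nz done [] hsplit hc L
        (fun f hf => by have := hdone f hf; omega) (by simp)
      simpa using this
    set low := max (pv + 1) low0 with hlowdef
    have hQlow : pvQ nz low := (hchar low (by omega)).2 (by omega)
    have hnQ : ∀ L : Int, L < low → ¬ pvQ nz L := by
      intro L hLlt
      by_cases hLpv : L ≤ pv
      · exact hinv L hLpv
      · intro hq
        have := (hchar L (by omega)).1 hq
        omega
    have h1 : ¬ (low < Lb) := fun hc' => hmin low hc' hQlow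
    have h2 : ¬ (Lb < low) := fun hc' => hnQ Lb hc' hfix
    have : List.sum ([] : List Int) = (0:Int) := rfl
    rw [this, hrun]
    omega
  | cons f rest' ih =>
    intro done prev hsplit hpv hdone hinv
    set pv := prev.getD 0 with hpvd
    have hfmem : f ∈ nz := by rw [hsplit]; simp
    have hfpos : 0 < f := hpos f hfmem
    have hc : done.length ≤ 256 := by
      have := congrArg List.length hsplit
      simp at this
      omega
    have hcpos : (0:Int) < 4096 - (done.length : Int) := by
      have : (done.length : Int) ≤ 256 := by exact_mod_cast hc
      omega
    have hSpos : 0 ≤ (f :: rest').sum := by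
      apply List.sum_nonneg
      intro x hx
      have : x ∈ nz := by rw [hsplit]; simp [hx]
      have := hpos x this
      omega
    set S := (f :: rest').sum with hSdef
    set low0 := PySem.Int.floordiv S (4096 - (done.length : Int)) + 1 with hlow0
    have hlow0pos : 1 ≤ low0 := by
      rw [hlow0, PySem.Int.floordiv_eq_ediv_of_pos hcpos]
      have := Int.ediv_nonneg hSpos (le_of_lt hcpos)
      omega
    -- sortedness facts
    have hpair := (List.pairwise_append.1 (hsplit ▸ hsort))
    have hdr : ∀ d ∈ done, ∀ r ∈ f :: rest', d ≤ r := hpair.2.2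
    have hfr : ∀ r ∈ rest', f ≤ r := by
      have := List.pairwise_cons.1 hpair.2.1
      exact this.1
    have hchar : ∀ L : Int, pv < L → L ≤ f → (pvQ nz L ↔ low0 ≤ L) := by
      intro L hL hLf
      exact pvQ_iff nz done (f :: rest') hsplit hc L
        (fun g hg => by have := hdone g hg; omega)
        (fun g hg => by
          rcases List.mem_cons.1 hg with rfl | hg'
          · omega
          · have := hfr g hg'; omega)
    set low := max (pv + 1) low0 with hlowdef
    have hrun : pvScanB (f :: rest') done.length prev S
        = if f ≥ low then low else pvScanB rest' (done.length + 1) (some f) (S - f) := by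
      rcases prev with _ | p
      · simp only [pvScanB, hpvd] at *
        simp only [Option.getD_none] at *
        have : low = low0 := by omega
        rw [← hlow0, this]
      · simp only [pvScanB, hpvd] at *
        simp only [Option.getD_some] at *
        have : low = if p + 1 > low0 then p + 1 else low0 := by
          split_ifs <;> omega
        rw [← hlow0, ← this]
    rw [hrun]
    by_cases hf : f ≥ low
    · rw [if_pos hf]
      have hQlow : pvQ nz low := (hchar low (by omega) hf).2 (by omega)
      have hnQ : ∀ L : Int, L < low → ¬ pvQ nz L := by
        intro L hLlt
        by_cases hLpv : L ≤ pv
        · exact hinv L hLpv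
        · intro hq
          have := (hchar L (by omega) (by omega)).1 hq
          omega
      have h1 : ¬ (low < Lb) := fun hc' => hmin low hc' hQlow
      have h2 : ¬ (Lb < low) := fun hc' => hnQ Lb hc' hfix
      omega
    · rw [if_neg hf]
      push_neg at hf
      have hsplit' : nz = (done ++ [f]) ++ rest' := by
        rw [hsplit]; simp
      have hS' : (S - f) = rest'.sum := by
        rw [hSdef]; simp [List.sum_cons]
      have hinv' : ∀ L : Int, L ≤ f → ¬ pvQ nz L := by
        intro L hLf
        by_cases hLpv : L ≤ pv
        · exact hinv L hLpv
        · intro hq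
          have := (hchar L (by omega) (by omega)).1 hq
          omega
      have := ih (done ++ [f]) (some f) hsplit'
        (by simp; omega)
        (by
          intro g hg
          simp only [Option.getD_some]
          rcases List.mem_append.1 hg with hg' | hg'
          · exact hdr g hg' f (by simp)
          · simp at hg'; omega)
        (by simpa using hinv')
      simp only [List.length_append, List.length_cons, List.length_nil] at this
      rw [← hS'] at this
      exact this

-- ===== VERDICT (by name: the statement is the Claim_ definition above) =====
theorem generate_frequency_table_spec : Claim_equal_generate_frequency_table := by
  unfold Claim_equal_generate_frequency_table
  intro raw hdom hpre
  unfold Spec_generate_frequency_table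
  obtain ⟨hne, hb⟩ := hpre
  have hcount := pvCount_spec raw (List.replicate 256 0) (by rw [List.length_replicate])
    (by intro f hf; rw [List.mem_replicate] at hf; omega) hb
  set fs := raw.foldl pvBumpA (List.replicate 256 0) with hfsdef
  obtain ⟨hlen, hfpos, hsum⟩ := hcount
  have hsum' : fs.sum = (raw.length : Int) := by
    rw [hsum, List.sum_replicate, smul_zero, zero_add]
  have hlen1 : 1 ≤ raw.length := by
    cases raw with
    | nil => exact absurd rfl hne
    | cons a l => simp
  haveI : DecidablePred (pvP fs) := fun n => by unfold pvP pvG; infer_instance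
  have hth : pvP fs (raw.length + 1) := by
    apply pvP_threshold fs hfpos hlen
    rw [hsum']
    push_cast
    omega
  have hex : ∃ n, pvP fs n := ⟨raw.length + 1, hth⟩
  set Lb := Nat.find hex with hLbdef
  have hfix : pvP fs Lb := Nat.find_spec hex
  have hmin : ∀ n : Nat, n < Lb → ¬ pvP fs n := fun n h => Nat.find_min hex h
  have hLbbound : Lb ≤ raw.length + 1 := Nat.find_le hth
  have hLb1 : 1 ≤ Lb := by
    by_contra hcon
    have h0 : Lb = 0 := by omega
    have h := hfix
    rw [h0] at h
    unfold pvP at h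
    have hp := pvG_pos fs hfpos (((0:Nat)) : Int)
    omega
  -- A side: the loop ends at the raised table for Lb
  have hA := pvLoopA_eq fs hfpos Lb hfix hmin (raw.length + 2) 0 (by omega) (by omega)
  have hz : ((0:Nat) : Int) = (0 : Int) := rfl
  rw [hz, pvRaise_zero fs hfpos] at hA
  -- B side: the scan returns Lb
  set nzl := PySem.List.sorted (fs.filter (fun f => f != 0)) (fun x => x) false with hnzdef
  have hperm : nzl.Perm (fs.filter (fun f => f != 0)) := PySem.List.sorted_perm _ _ _
  have hpos : ∀ f ∈ nzl, 0 < f := by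
    intro f hf
    have hf2 : f ∈ fs.filter (fun f => f != 0) := hperm.mem_iff.1 hf
    have := List.mem_filter.1 hf2
    have h1 := hfpos f this.1
    have h2 : f ≠ 0 := by simpa using this.2
    omega
  have hsort : nzl.Pairwise (· ≤ ·) := PySem.List.sorted_pairwise _ (fun x => x)
  have hnzlen : nzl.length ≤ 256 := by
    rw [hnzdef, PySem.List.length_sorted]
    calc (fs.filter (fun f => f != 0)).length ≤ fs.length := List.length_filter_le _ _
      _ = 256 := hlen
  have hbridge : ∀ L : Int, pvGnz nzl L = pvG fs L :=
    fun L => (pvG_eq_gnz fs nzl hperm L).symm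
  have hfixQ : pvQ nzl (Lb : Int) := by
    unfold pvQ
    rw [hbridge]
    exact hfix
  have hminQ : ∀ L : Int, L < (Lb : Int) → ¬ pvQ nzl L := by
    intro L hL hq
    unfold pvQ at hq
    by_cases h1 : L < 1
    · have := pvGnz_pos nzl hpos L
      omega
    · have h0 : 0 ≤ L := by omega
      have hcast : ((L.toNat : Nat) : Int) = L := Int.toNat_of_nonneg h0
      have hn : L.toNat < Lb := by omega
      apply hmin L.toNat hn
      unfold pvP
      rw [hcast, ← hbridge]
      exact hq
  have hscan := pvScanB_eq nzl hpos hsort hnzlen (Lb : Int) hfixQ hminQ nzl [] none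
    rfl (by simp) (by simp)
    (by
      intro L hL
      apply hminQ
      simp at hL
      have : (1:Int) ≤ (Lb:Int) := by exact_mod_cast hLb1
      omega)
  simp only [List.length_nil] at hscan
  -- assemble
  show generate_frequency_table raw = generate_frequency_table_alt raw
  unfold generate_frequency_table generate_frequency_table_alt
  simp only [show pvBumpB = pvBumpA from rfl]
  rw [← hfsdef, ← hnzdef]
  have hXfs : fs.map (fun f => if f = 0 then f else max f (Lb : Int)) = pvRaise (Lb : Int) fs := rfl
  rw [hscan, hA, hXfs]
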